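-- pv_equiv track=rewrite | github.com/ahfmrptEkd/Linear-Algebra | 3. More Matrix/mm_func.py | u_bidiag
-- ===== SOURCE A (Python) =====
-- def u_bidiag(A):
--     """
--     upper bidiagonal 행렬
--     input: 행렬 A
--     output: 행렬 A의 upper bidiagonal 행렬 res
--     """
--     n = len(A)
--     p = len(A[0])
--
--     res = []
--     for i in range(0, n):
--         row = []
--         for j in range(0, p):
--             if i > j or j - i > 1:
--                 row.append(0)
--             else:
--                 row.append(A[i][j])
--         res.append(row)
--     return res
-- ===== SOURCE B (Python) =====
-- def u_bidiag(A):
--     n = len(A)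
--     p = len(A[0])
--     res = [[0] * p for _ in range(n)]
--     for i in range(n):
--         if i < p:
--             res[i][i] = A[i][i]
--         if i + 1 < p:
--             res[i][i + 1] = A[i][i + 1]
--     return res
-- ===== Notes on version B (the rewrite author's own statement) =====
-- stated objective: simpler
-- what changed: B builds a zero matrix and writes only the diagonal and superdiagonal entries, instead of A's per-element branch over all n*p cells; the per-cell branch is replaced by bulk zero-fill plus O(n) band writes.
-- outside the precondition, e.g. on u_bidiag([]): A raises IndexError, B raises IndexError; on u_bidiag([[1, 2], [3]]): A raises IndexError, B raises IndexError
import Mathlib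
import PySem

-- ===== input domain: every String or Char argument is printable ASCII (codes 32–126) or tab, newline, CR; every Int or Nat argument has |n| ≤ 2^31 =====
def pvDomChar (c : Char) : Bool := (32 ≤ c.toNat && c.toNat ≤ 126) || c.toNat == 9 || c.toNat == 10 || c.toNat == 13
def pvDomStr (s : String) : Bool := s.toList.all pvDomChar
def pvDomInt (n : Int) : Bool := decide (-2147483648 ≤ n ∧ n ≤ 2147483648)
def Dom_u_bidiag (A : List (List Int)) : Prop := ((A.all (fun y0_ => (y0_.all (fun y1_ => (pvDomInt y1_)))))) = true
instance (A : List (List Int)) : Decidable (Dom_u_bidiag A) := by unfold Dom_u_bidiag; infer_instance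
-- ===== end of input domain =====

-- B builds a zero matrix and writes only the diagonal and superdiagonal entries,
-- replacing A's nested per-element branch; same cost, simpler structure.


-- A[i][j] with nonnegative indices; Pre_ guarantees the reads are in range,
-- so the `getD` defaults are never the value used on admitted inputs.
def pvCell (A : List (List Int)) (i j : Nat) : Int :=
  (PySem.List.pyGet? ((PySem.List.pyGet? A (i : Int)).getD []) (j : Int)).getD 0

-- ===== PORT A =====
def u_bidiag (A : List (List Int)) : List (List Int) :=
  let n := A.length
  let p := (A.headD []).length
  (List.range n).foldl (fun res i =>
    res ++ [(List.range p).foldl (fun row j =>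
      row ++ [if i > j ∨ j - i > 1 then 0 else pvCell A i j]) []]) []

-- ===== PORT B =====
def u_bidiag_alt (A : List (List Int)) : List (List Int) :=
  let n := A.length
  let p := (A.headD []).length
  (List.range n).map (fun i =>
    let row := List.replicate p (0 : Int)
    let row := if i < p then row.set i (pvCell A i i) else row
    if i + 1 < p then row.set (i + 1) (pvCell A i (i + 1)) else row)

-- ===== PRECONDITION & SPEC =====
-- Pre_ excludes exactly the inputs where Python A raises IndexError: the empty list
-- (len(A[0])) and ragged inputs whose row i is too short for the band reads A[i][i], A[i][i+1].
def Pre_u_bidiag (A : List (List Int)) : Prop :=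
  A ≠ [] ∧ ∀ i ∈ List.range A.length,
    i < (A.headD []).length →
      min (A.headD []).length (i + 2) ≤ (A.getD i []).length
instance (A : List (List Int)) : Decidable (Pre_u_bidiag A) := by unfold Pre_u_bidiag; infer_instance
def pvWitness_u_bidiag : List (List Int) := [[1, 2, 3], [4, 5, 6], [7, 8, 9]]

def Spec_u_bidiag (A : List (List Int)) (out : List (List Int)) : Prop := out = u_bidiag_alt A
instance (A : List (List Int)) (out : List (List Int)) : Decidable (Spec_u_bidiag A out) := by unfold Spec_u_bidiag; infer_instance

-- ===== CLAIM (what is proved, stated in full; the proofs are below) =====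
def Claim_equal_u_bidiag : Prop := ∀ (A : List (List Int)), Dom_u_bidiag A → Pre_u_bidiag A → Spec_u_bidiag A (u_bidiag A)

-- ===== LEMMAS AND PROOFS =====
theorem pv_foldl_append {α β : Type} (f : α → β) :
    ∀ (l : List α) (acc : List β),
      l.foldl (fun r x => r ++ [f x]) acc = acc ++ l.map f := by
  intro l
  induction l with
  | nil => simp
  | cons x xs ih => intro acc; simp [List.foldl_cons, ih]

theorem pv_row_eq (A : List (List Int)) (i p : Nat) :
    (let row := List.replicate p (0 : Int)
     let row := if i < p then row.set i (pvCell A i i) else row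
     if i + 1 < p then row.set (i + 1) (pvCell A i (i + 1)) else row)
      = (List.range p).map (fun j => if i > j ∨ j - i > 1 then 0 else pvCell A i j) := by
  apply List.ext_getElem
  · split_ifs <;> simp
  · intro j hj hj'
    simp only [List.length_map, List.length_range] at hj'
    split_ifs with h1 h2 h2 <;>
      simp only [List.getElem_map, List.getElem_range, List.getElem_set,
        List.getElem_replicate] <;>
      split_ifs <;> simp_all <;> (try subst_vars) <;> omega

theorem u_bidiag_eq (A : List (List Int)) : u_bidiag A = u_bidiag_alt A := by
  unfold u_bidiag u_bidiag_alt
  rw [pv_foldl_append]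
  simp only [List.nil_append]
  apply List.map_congr_left
  intro i _
  rw [pv_foldl_append]
  simp only [List.nil_append]
  exact (pv_row_eq A i _).symm

-- ===== VERDICT (by name: the statement is the Claim_ definition above) =====
theorem u_bidiag_spec : Claim_equal_u_bidiag := by
  intro A _ _
  unfold Spec_u_bidiag
  exact u_bidiag_eq A
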